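-- pv_equiv track=rewrite | github.com/EricSchwarz16/Ora-Info-2025-2026 | Lectie-Info-11.10.2025/Tema_optional/#4300.py | count_secvk_distincte
-- ===== SOURCE A (Python) =====
-- def count_secvk_distincte(N, K, numere):
--     frecventa = {}      # dictionar pentru frecventele din fereastra curenta
--     distincte = 0
--     total = 0
--
--     for i in range(N):
--         val = numere[i]
--         # adaugam valoarea in fereastra
--         if val in frecventa:
--             frecventa[val] += 1
--
--         else:
--             frecventa[val] = 1
--             distincte += 1
--         # scoatem elementul care iese din fereastra
--         if i >= K:
--             iesire = numere[i - K]
--             frecventa[iesire] -= 1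
--             if frecventa[iesire] == 0:
--                 del frecventa[iesire]
--                 distincte -= 1
--
--         # verificam daca avem exact K elemente distincte
--         if i >= K - 1 and distincte == K:
--             total += 1
--
--     return total
-- ===== SOURCE B (Python) =====
-- def count_secvk_distincte(N, K, numere):
--     # Naive per-window recomputation: for each ending index i, slice the
--     # length-K window and count its distinct values directly.
--     total = 0
--     for i in range(N):
--         if i >= K - 1:
--             window = numere[i - K + 1:i + 1]
--             if len(set(window)) == K:
--                 total += 1
--     return total
-- ===== Notes on version B (the rewrite author's own statement) =====
-- stated objective: simpler
-- what changed: Replaced the incremental sliding window (frequency dict + running distinct count with add/remove bookkeeping) by a per-window recomputation: slice each length-K window and count it when len(set(window)) == K.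
-- outside the precondition, e.g. on count_secvk_distincte(2, -1, [5, 5, 5]): A returns 0, B returns 0
import Mathlib
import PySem

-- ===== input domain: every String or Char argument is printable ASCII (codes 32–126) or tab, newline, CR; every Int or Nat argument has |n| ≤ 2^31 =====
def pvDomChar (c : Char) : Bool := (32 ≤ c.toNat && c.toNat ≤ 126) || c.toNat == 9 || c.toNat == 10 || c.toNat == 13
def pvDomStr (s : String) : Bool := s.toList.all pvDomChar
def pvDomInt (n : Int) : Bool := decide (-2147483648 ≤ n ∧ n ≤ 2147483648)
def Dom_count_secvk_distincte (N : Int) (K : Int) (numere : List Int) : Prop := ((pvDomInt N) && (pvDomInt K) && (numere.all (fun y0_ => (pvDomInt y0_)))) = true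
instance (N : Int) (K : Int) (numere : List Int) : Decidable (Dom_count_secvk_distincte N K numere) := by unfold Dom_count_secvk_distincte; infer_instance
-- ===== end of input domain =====

-- B replaces A's incremental frequency-dict sliding window by a per-window slice-and-count
-- recomputation (simpler, not faster); equivalence is proved on Pre_ below.

-- ===== PORT A =====
-- one loop step of A; indexing uses pyGetD (Pre_ guarantees every index is in range,
-- and that 'frecventa[iesire] -= 1' finds its key, so Python never raises there)
def stepA (numere : List Int) (K : Int)
    (st : PySem.Dict Int Int × Int × Int) (i : Int) :
    PySem.Dict Int Int × Int × Int :=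
  let frec := st.1
  let distincte := st.2.1
  let total := st.2.2
  let val := PySem.List.pyGetD numere i 0
  -- adaugam valoarea in fereastra
  let p1 : PySem.Dict Int Int × Int :=
    if frec.contains val then (frec.insert val (frec.getD val 0 + 1), distincte)
    else (frec.insert val 1, distincte + 1)
  -- scoatem elementul care iese din fereastra
  let p2 : PySem.Dict Int Int × Int :=
    if K ≤ i then
      let iesire := PySem.List.pyGetD numere (i - K) 0
      let f := p1.1.insert iesire (p1.1.getD iesire 0 - 1)
      if f.getD iesire 0 = 0 then (f.erase iesire, p1.2 - 1) else (f, p1.2)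
    else p1
  -- verificam daca avem exact K elemente distincte
  let total := if K - 1 ≤ i ∧ p2.2 = K then total + 1 else total
  (p2.1, p2.2, total)

def count_secvk_distincte (N : Int) (K : Int) (numere : List Int) : Int :=
  ((PySem.List.pyRange 0 N 1).foldl (stepA numere K) (PySem.Dict.empty, 0, 0)).2.2

-- ===== PORT B =====
def count_secvk_distincte_alt (N : Int) (K : Int) (numere : List Int) : Int :=
  (PySem.List.pyRange 0 N 1).foldl
    (fun total i =>
      if K - 1 ≤ i then
        let window := PySem.List.slice numere (some (i - K + 1)) (some (i + 1))
        if ((PySem.Set.ofList window).length : Int) = K then total + 1 else total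
      else total) 0

-- ===== PRECONDITION & SPEC =====
-- Pre_ excludes N > len(numere) (A raises IndexError at i = len(numere)) and K < 0, on which
-- A raises KeyError or IndexError at numere[i-K] on almost every input; no closed-form condition
-- separates the few K < 0 inputs on which A still returns, and A and B both return 0 on them.
def Pre_count_secvk_distincte (N : Int) (K : Int) (numere : List Int) : Prop :=
  0 ≤ K ∧ N ≤ (numere.length : Int)
instance (N : Int) (K : Int) (numere : List Int) : Decidable (Pre_count_secvk_distincte N K numere) := by
  unfold Pre_count_secvk_distincte; infer_instance

def pvWitness_count_secvk_distincte : Int × Int × List Int := (4, 2, [1, 2, 2, 3])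

def Spec_count_secvk_distincte (N : Int) (K : Int) (numere : List Int) (out : Int) : Prop := out = count_secvk_distincte_alt N K numere
instance (N : Int) (K : Int) (numere : List Int) (out : Int) : Decidable (Spec_count_secvk_distincte N K numere out) := by unfold Spec_count_secvk_distincte; infer_instance

-- ===== CLAIM (what is proved, stated in full; the proofs are below) =====
def Claim_equal_count_secvk_distincte : Prop := ∀ (N : Int) (K : Int) (numere : List Int), Dom_count_secvk_distincte N K numere → Pre_count_secvk_distincte N K numere → Spec_count_secvk_distincte N K numere (count_secvk_distincte N K numere)

-- ===== LEMMAS AND PROOFS =====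

-- the window A maintains after n loop steps: indices [max 0 (n-k), n)
def pvWin (k : Nat) (l : List Int) (n : Nat) : List Int := (l.take n).drop (n - k)

-- facts about Dict.erase (the prelude has no erase lemmas)
lemma pv_get?_erase (d : PySem.Dict Int Int) (k k' : Int) :
    (d.erase k).get? k' = if k' = k then none else d.get? k' := by
  obtain ⟨items⟩ := d
  simp only [PySem.Dict.get?, PySem.Dict.erase]
  induction items with
  | nil => simp
  | cons p t ih =>
    by_cases h1 : p.1 = k <;> by_cases h2 : p.1 = k' <;>
      simp_all

lemma pv_contains_erase (d : PySem.Dict Int Int) (k k' : Int) :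
    (d.erase k).contains k' = if k' = k then false else d.contains k' := by
  rw [PySem.Dict.contains_eq_isSome_get?, pv_get?_erase]
  split <;> simp [PySem.Dict.contains_eq_isSome_get?]

lemma pv_getD_erase (d : PySem.Dict Int Int) (k k' : Int) :
    (d.erase k).getD k' 0 = if k' = k then 0 else d.getD k' 0 := by
  simp only [PySem.Dict.getD, pv_get?_erase]
  split <;> simp

-- len(set(xs)) is the number of distinct elements
lemma pvSetLen (w : List Int) : ((PySem.Set.ofList w).length : Int) = (w.toFinset.card : Int) := by
  have hnd : (PySem.Set.ofList w).Nodup := PySem.Set.nodup_ofList w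
  have hfin : (PySem.Set.ofList w).toFinset = w.toFinset := by
    ext x; simp [List.mem_toFinset, PySem.Set.mem_ofList]
  rw [← List.toFinset_card_of_nodup hnd, hfin]

-- window shape lemmas
lemma pvWin_zero (k : Nat) (l : List Int) : pvWin k l 0 = [] := by simp [pvWin]

lemma pvWin_succ_lt (k : Nat) (l : List Int) (n : Nat) (hn : n < l.length) (h : n < k) :
    pvWin k l (n+1) = pvWin k l n ++ [l[n]] := by
  unfold pvWin
  rw [Nat.sub_eq_zero_of_le (by omega), Nat.sub_eq_zero_of_le (Nat.le_of_lt h)]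
  simp only [List.drop_zero]
  rw [List.take_add_one, List.getElem?_eq_getElem hn]
  simp

lemma pvWin_succ_ge (k : Nat) (l : List Int) (n : Nat) (hn : n < l.length) (h : k ≤ n) :
    pvWin k l n ++ [l[n]] = l[n-k]'(by omega) :: pvWin k l (n+1) := by
  rcases Nat.eq_zero_or_pos k with hk | hk
  · subst hk
    simp [pvWin]
  · unfold pvWin
    have hlen : n - k < (l.take n).length := by simp; omega
    have h1 : (l.take n).drop (n - k) = (l.take n)[n-k] :: (l.take n).drop (n - k + 1) :=
      List.drop_eq_getElem_cons hlen
    have hget : (l.take n)[n-k]'hlen = l[n-k]'(by omega) := List.getElem_take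
    have h2 : (l.take (n+1)).drop (n + 1 - k) = (l.take n).drop (n - k + 1) ++ [l[n]] := by
      have htk : l.take (n+1) = l.take n ++ [l[n]] := by
        rw [List.take_add_one, List.getElem?_eq_getElem hn]; simp
      have hd : n + 1 - k = n - k + 1 := by omega
      have hle : n - k + 1 ≤ (l.take n).length := by simp; omega
      rw [htk, hd, List.drop_append_of_le_length hle]
    rw [h1, hget, h2]
    simp

-- A's counting predicate: this window position contributes 1 to the total
def pvCond (K : Int) (l : List Int) (j : Nat) : Bool :=
  decide (K - 1 ≤ (j:Int)) && decide (((pvWin K.toNat l (j+1)).toFinset.card : Int) = K)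

-- the total-update step: A's "if i >= K-1 and distincte == K" increment as a countP term
lemma pvTotal (K : Int) (l : List Int) (n : Nat) (t : Int) :
    (if K - 1 ≤ (n : Int) ∧ (((pvWin K.toNat l (n+1)).toFinset.card : Nat) : Int) = K then t + 1 else t)
      = t + (if pvCond K l n then 1 else 0) := by
  by_cases h1 : K - 1 ≤ (n:Int) <;>
    by_cases h2 : (((pvWin K.toNat l (n+1)).toFinset.card : Nat) : Int) = K <;>
      simp [pvCond, h1, h2]

-- phase 2 of a step of A (window-exit removal + total update), abstracted over the
-- dict produced by phase 1 (which satisfies the invariant for the extended window)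
lemma pvPhase2 (l : List Int) (K : Int) (hK : 0 ≤ K) (n : Nat) (hn : n < l.length)
    (f1 : PySem.Dict Int Int) (t : Int)
    (hc : ∀ u : Int, f1.getD u 0 = (((pvWin K.toNat l n ++ [l[n]]).count u : Nat) : Int))
    (hm : ∀ u : Int, f1.contains u = true ↔ u ∈ pvWin K.toNat l n ++ [l[n]]) :
    ∃ frec' : PySem.Dict Int Int,
      ((if K ≤ (n : Int) then
          if (f1.insert (PySem.List.pyGetD l ((n : Int) - K) 0)
                (f1.getD (PySem.List.pyGetD l ((n : Int) - K) 0) 0 - 1)).getD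
              (PySem.List.pyGetD l ((n : Int) - K) 0) 0 = 0 then
            ((f1.insert (PySem.List.pyGetD l ((n : Int) - K) 0)
                (f1.getD (PySem.List.pyGetD l ((n : Int) - K) 0) 0 - 1)).erase
              (PySem.List.pyGetD l ((n : Int) - K) 0),
              (((pvWin K.toNat l n ++ [l[n]]).toFinset.card : Nat) : Int) - 1)
          else
            (f1.insert (PySem.List.pyGetD l ((n : Int) - K) 0)
                (f1.getD (PySem.List.pyGetD l ((n : Int) - K) 0) 0 - 1),
              (((pvWin K.toNat l n ++ [l[n]]).toFinset.card : Nat) : Int))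
        else (f1, (((pvWin K.toNat l n ++ [l[n]]).toFinset.card : Nat) : Int))).1,
        (if K ≤ (n : Int) then
          if (f1.insert (PySem.List.pyGetD l ((n : Int) - K) 0)
                (f1.getD (PySem.List.pyGetD l ((n : Int) - K) 0) 0 - 1)).getD
              (PySem.List.pyGetD l ((n : Int) - K) 0) 0 = 0 then
            ((f1.insert (PySem.List.pyGetD l ((n : Int) - K) 0)
                (f1.getD (PySem.List.pyGetD l ((n : Int) - K) 0) 0 - 1)).erase
              (PySem.List.pyGetD l ((n : Int) - K) 0),
              (((pvWin K.toNat l n ++ [l[n]]).toFinset.card : Nat) : Int) - 1)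
          else
            (f1.insert (PySem.List.pyGetD l ((n : Int) - K) 0)
                (f1.getD (PySem.List.pyGetD l ((n : Int) - K) 0) 0 - 1),
              (((pvWin K.toNat l n ++ [l[n]]).toFinset.card : Nat) : Int))
        else (f1, (((pvWin K.toNat l n ++ [l[n]]).toFinset.card : Nat) : Int))).2,
        if K - 1 ≤ (n : Int) ∧
            (if K ≤ (n : Int) then
              if (f1.insert (PySem.List.pyGetD l ((n : Int) - K) 0)
                    (f1.getD (PySem.List.pyGetD l ((n : Int) - K) 0) 0 - 1)).getD
                  (PySem.List.pyGetD l ((n : Int) - K) 0) 0 = 0 then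
                ((f1.insert (PySem.List.pyGetD l ((n : Int) - K) 0)
                    (f1.getD (PySem.List.pyGetD l ((n : Int) - K) 0) 0 - 1)).erase
                  (PySem.List.pyGetD l ((n : Int) - K) 0),
                  (((pvWin K.toNat l n ++ [l[n]]).toFinset.card : Nat) : Int) - 1)
              else
                (f1.insert (PySem.List.pyGetD l ((n : Int) - K) 0)
                    (f1.getD (PySem.List.pyGetD l ((n : Int) - K) 0) 0 - 1),
                  (((pvWin K.toNat l n ++ [l[n]]).toFinset.card : Nat) : Int))
            else (f1, (((pvWin K.toNat l n ++ [l[n]]).toFinset.card : Nat) : Int))).2 = K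
        then t + 1 else t) =
        (frec', (((pvWin K.toNat l (n+1)).toFinset.card : Nat) : Int),
          t + (if pvCond K l n then 1 else 0)) ∧
      (∀ v : Int, frec'.getD v 0 = (((pvWin K.toNat l (n+1)).count v : Nat) : Int)) ∧
      (∀ v : Int, frec'.contains v = true ↔ v ∈ pvWin K.toNat l (n+1)) := by
  have hKk : K = (K.toNat : Int) := (Int.toNat_of_nonneg hK).symm
  by_cases hkn : K.toNat ≤ n
  · -- the window is full: the exiting element numere[i-K] is removed
    have hKn : K ≤ (n:Int) := by rw [hKk]; exact_mod_cast hkn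
    have hnk : n - K.toNat < l.length := by omega
    have hies : PySem.List.pyGetD l ((n : Int) - K) 0 = l[n - K.toNat]'hnk := by
      have h1 : ((n:Int) - K) = ((n - K.toNat : Nat) : Int) := by
        omega
      rw [h1, PySem.List.pyGetD_natCast]
      exact List.getD_eq_getElem l 0 hnk
    have hmid : pvWin K.toNat l n ++ [l[n]] = l[n - K.toNat]'hnk :: pvWin K.toNat l (n+1) :=
      pvWin_succ_ge K.toNat l n hn hkn
    have hg1 : (f1.insert (l[n - K.toNat]'hnk) (f1.getD (l[n - K.toNat]'hnk) 0 - 1)).getD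
        (l[n - K.toNat]'hnk) 0
        = (((pvWin K.toNat l (n+1)).count (l[n - K.toNat]'hnk) : Nat) : Int) := by
      rw [PySem.Dict.getD_insert]
      rw [if_pos rfl, hc, hmid, List.count_cons_self]
      push_cast; ring
    simp only [if_pos hKn, hies, hg1]
    by_cases hht : l[n - K.toNat]'hnk ∈ pvWin K.toNat l (n+1)
    · -- still present in the new window: no key deletion, distinct count unchanged
      have hz : ¬ ((((pvWin K.toNat l (n+1)).count (l[n - K.toNat]'hnk) : Nat) : Int) = 0) := by
        have := List.count_pos_iff.mpr hht
        omega
      have hcc : (((pvWin K.toNat l n ++ [l[n]]).toFinset.card : Nat) : Int)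
          = (((pvWin K.toNat l (n+1)).toFinset.card : Nat) : Int) := by
        rw [hmid, List.toFinset_cons,
          Finset.insert_eq_self.mpr (List.mem_toFinset.mpr hht)]
      simp only [if_neg hz, hcc]
      refine ⟨f1.insert (l[n - K.toNat]'hnk) (f1.getD (l[n - K.toNat]'hnk) 0 - 1), ?_, ?_, ?_⟩
      · simp only [pvTotal]
      · intro v
        rw [PySem.Dict.getD_insert]
        by_cases hu : v = l[n - K.toNat]'hnk
        · subst hu; rw [if_pos rfl]
          rw [hc, hmid, List.count_cons_self]; push_cast; ring
        · rw [if_neg hu, hc, hmid, List.count_cons]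
          simp [Ne.symm hu]
      · intro v
        rw [PySem.Dict.contains_insert]
        by_cases hu : v = l[n - K.toNat]'hnk
        · subst hu; simp [hht]
        · simp only [hu, beq_iff_eq, Bool.or_eq_true]
          rw [hm v, hmid]
          simp [hu]
    · -- the exiting value leaves the window entirely: key erased, distinct count drops
      have hz : (((pvWin K.toNat l (n+1)).count (l[n - K.toNat]'hnk) : Nat) : Int) = 0 := by
        simp [List.count_eq_zero.mpr hht]
      have hcc : (((pvWin K.toNat l n ++ [l[n]]).toFinset.card : Nat) : Int) - 1
          = (((pvWin K.toNat l (n+1)).toFinset.card : Nat) : Int) := by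
        rw [hmid, List.toFinset_cons,
          Finset.card_insert_of_notMem (by simp [hht])]
        push_cast; ring
      simp only [if_pos hz, hcc]
      refine ⟨(f1.insert (l[n - K.toNat]'hnk) (f1.getD (l[n - K.toNat]'hnk) 0 - 1)).erase
        (l[n - K.toNat]'hnk), ?_, ?_, ?_⟩
      · simp only [pvTotal]
      · intro v
        rw [pv_getD_erase]
        by_cases hu : v = l[n - K.toNat]'hnk
        · subst hu; rw [if_pos rfl]; exact hz.symm
        · rw [if_neg hu, PySem.Dict.getD_insert, if_neg hu, hc, hmid, List.count_cons]
          simp [Ne.symm hu]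
      · intro v
        rw [pv_contains_erase]
        by_cases hu : v = l[n - K.toNat]'hnk
        · subst hu; simp [hht]
        · rw [if_neg hu, PySem.Dict.contains_insert]
          simp only [beq_iff_eq, hu, Bool.or_eq_true]
          rw [hm v, hmid]
          simp [hu]
  · -- window not yet full: nothing is removed
    have hKn : ¬ (K ≤ (n:Int)) := by
      rw [hKk]; exact_mod_cast fun h => hkn (by exact_mod_cast h)
    have hmid : pvWin K.toNat l (n+1) = pvWin K.toNat l n ++ [l[n]] :=
      pvWin_succ_lt K.toNat l n hn (lt_of_not_ge hkn)
    rw [← hmid] at hc hm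
    simp only [if_neg hKn, ← hmid]
    exact ⟨f1, by simp only [pvTotal], hc, hm⟩

-- one step of A preserves the window invariant
lemma pvStepA (l : List Int) (K : Int) (hK : 0 ≤ K) (n : Nat) (hn : n < l.length)
    (frec : PySem.Dict Int Int) (t : Int)
    (hcount : ∀ v : Int, frec.getD v 0 = (((pvWin K.toNat l n).count v : Nat) : Int))
    (hmem : ∀ v : Int, frec.contains v = true ↔ v ∈ pvWin K.toNat l n) :
    ∃ frec' : PySem.Dict Int Int,
      stepA l K (frec, (((pvWin K.toNat l n).toFinset.card : Nat) : Int), t) (n : Int) =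
        (frec', (((pvWin K.toNat l (n+1)).toFinset.card : Nat) : Int),
          t + (if pvCond K l n then 1 else 0)) ∧
      (∀ v : Int, frec'.getD v 0 = (((pvWin K.toNat l (n+1)).count v : Nat) : Int)) ∧
      (∀ v : Int, frec'.contains v = true ↔ v ∈ pvWin K.toNat l (n+1)) := by
  have hKk : K = (K.toNat : Int) := (Int.toNat_of_nonneg hK).symm
  have hval : PySem.List.pyGetD l ((n : Nat) : Int) 0 = l[n] := by
    rw [PySem.List.pyGetD_natCast]
    exact List.getD_eq_getElem l 0 hn
  by_cases hvm : l[n] ∈ pvWin K.toNat l n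
  · have hcv : frec.contains l[n] = true := (hmem _).mpr hvm
    have hcard : ((pvWin K.toNat l n).toFinset.card : Int)
        = (((pvWin K.toNat l n ++ [l[n]]).toFinset.card : Nat) : Int) := by
      rw [List.toFinset_append]
      simp [Finset.insert_eq_self.mpr (List.mem_toFinset.mpr hvm)]
    simp only [stepA, hval, hcv, if_true]
    rw [hcard]
    exact pvPhase2 l K hK n hn _ t
      (by
        intro u
        rw [PySem.Dict.getD_insert]
        by_cases hu : u = l[n]
        · subst hu
          simp [List.count_append, hcount]
        · simp [hu, hcount u, List.count_append, Ne.symm hu])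
      (by
        intro u
        rw [PySem.Dict.contains_insert]
        by_cases hu : u = l[n] <;> simp [hu, hmem u])
  · have hcv : frec.contains l[n] = false := by
      rcases Bool.eq_false_or_eq_true (frec.contains l[n]) with h | h
      · exact absurd ((hmem _).mp h) hvm
      · exact h
    have hcard : ((pvWin K.toNat l n).toFinset.card : Int) + 1
        = (((pvWin K.toNat l n ++ [l[n]]).toFinset.card : Nat) : Int) := by
      rw [List.toFinset_append]
      simp
      rw [Finset.card_insert_of_notMem (by simp [hvm])]
      push_cast; ring
    simp only [stepA, hval, hcv, if_false, Bool.false_eq_true]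
    rw [hcard]
    exact pvPhase2 l K hK n hn _ t
      (by
        intro u
        rw [PySem.Dict.getD_insert]
        by_cases hu : u = l[n]
        · subst hu
          have : (pvWin K.toNat l n).count l[n] = 0 := List.count_eq_zero.mpr hvm
          simp [List.count_append, this]
        · simp [hu, hcount u, List.count_append, Ne.symm hu])
      (by
        intro u
        rw [PySem.Dict.contains_insert]
        by_cases hu : u = l[n] <;> simp [hu, hmem u])

-- the invariant of A's loop: the dict holds exact window counts, distincte the
-- number of distinct window values, total the number of good positions so far
lemma pvA_inv (l : List Int) (K : Int) (hK : 0 ≤ K) (n : Nat) (hn : n ≤ l.length) :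
    ∃ frec : PySem.Dict Int Int,
      ((List.range n).foldl (fun st (j : Nat) => stepA l K st (j:Int)) (PySem.Dict.empty, 0, 0)) =
        (frec, (((pvWin K.toNat l n).toFinset.card : Nat) : Int),
          (((List.range n).countP (pvCond K l) : Nat) : Int)) ∧
      (∀ v : Int, frec.getD v 0 = (((pvWin K.toNat l n).count v : Nat) : Int)) ∧
      (∀ v : Int, frec.contains v = true ↔ v ∈ pvWin K.toNat l n) := by
  induction n with
  | zero =>
    refine ⟨PySem.Dict.empty, ?_, ?_, ?_⟩ <;>
      simp [pvWin_zero, PySem.Dict.getD_empty, PySem.Dict.contains_empty]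
  | succ n ih =>
    obtain ⟨frec, heq, hcount, hmem⟩ := ih (by omega)
    have hn' : n < l.length := by omega
    rw [List.range_succ, List.foldl_append, heq, List.foldl_cons, List.foldl_nil]
    obtain ⟨frec', heq', hc', hm'⟩ := pvStepA l K hK n hn' frec _ hcount hmem
    refine ⟨frec', ?_, hc', hm'⟩
    rw [heq']
    have hcp : (((List.range n ++ [n]).countP (pvCond K l) : Nat) : Int)
        = (((List.range n).countP (pvCond K l) : Nat) : Int)
          + (if pvCond K l n then 1 else 0) := by
      rw [List.countP_append]
      by_cases h : pvCond K l n <;> simp [h]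
    rw [hcp]

-- B's loop computes the same count of good window positions
lemma pvB_inv (l : List Int) (K : Int) (hK : 0 ≤ K) (n : Nat) (hn : n ≤ l.length) :
    (List.range n).foldl (fun total (j : Nat) =>
      if K - 1 ≤ ((j:Nat) : Int) then
        if ((PySem.Set.ofList (PySem.List.slice l (some (((j:Nat):Int) - K + 1))
              (some (((j:Nat):Int) + 1)))).length : Int) = K
        then total + 1 else total
      else total) 0
    = (((List.range n).countP (pvCond K l) : Nat) : Int) := by
  induction n with
  | zero => simp
  | succ n ih =>
    rw [List.range_succ, List.foldl_append, ih (by omega), List.foldl_cons, List.foldl_nil]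
    have hcp : (((List.range n ++ [n]).countP (pvCond K l) : Nat) : Int)
        = (((List.range n).countP (pvCond K l) : Nat) : Int)
          + (if pvCond K l n then 1 else 0) := by
      rw [List.countP_append]
      by_cases h : pvCond K l n <;> simp [h]
    rw [hcp]
    by_cases h1 : K - 1 ≤ (n:Int)
    · have ha : ((n:Int) - K + 1) = ((n + 1 - K.toNat : Nat) : Int) := by omega
      have hb : ((n:Int) + 1) = ((n + 1 : Nat) : Int) := by push_cast; ring
      have hsl : PySem.List.slice l (some ((n:Int) - K + 1)) (some ((n:Int) + 1))
          = pvWin K.toNat l (n+1) := by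
        rw [ha, hb, PySem.List.slice_natCast, pvWin, List.drop_take]
      rw [if_pos h1, hsl, pvSetLen]
      by_cases h2 : (((pvWin K.toNat l (n+1)).toFinset.card : Nat) : Int) = K <;>
        simp [pvCond, h1, h2]
    · rw [if_neg h1]
      simp [pvCond, h1]

-- ===== VERDICT (by name: the statement is the Claim_ definition above) =====
theorem count_secvk_distincte_spec : Claim_equal_count_secvk_distincte := by
  intro N K numere _ hPre
  obtain ⟨hK, hN⟩ := hPre
  unfold Spec_count_secvk_distincte count_secvk_distincte count_secvk_distincte_alt
  have hn : N.toNat ≤ numere.length := by omega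
  rw [PySem.List.pyRange_one]
  simp only [Int.sub_zero, zero_add, List.foldl_map]
  obtain ⟨frec, heq, -, -⟩ := pvA_inv numere K hK N.toNat hn
  rw [heq, pvB_inv numere K hK N.toNat hn]
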